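-- pv_equiv track=rewrite | github.com/F1schGott/CSC108 | A3/recommender_functions.py | get_movie_genres
-- ===== SOURCE A (Python) =====
-- from typing import TextIO, List, Dict
--
-- def comma_finder(line: str) -> Dict[int, int]:
--     r"""Return the indexs of every commas in the line.
--     >>> comma_finder('68735,Warcraft,2016-05-25,123.0,Action,Adventure,Fantasy\n')
--     {1: 5, 2: 14, 3: 25, 4: 31, 5: 38, 6: 48}
--     >>> comma_finder('302156,Criminal,2016-04-14,113.0,Action\n')
--     {1: 6, 2: 15, 3: 26, 4: 32}
--     """
--     index_dic = {}
--     j = 1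
--     i = 0
--     while i < len(line):
--         if line[i] == ',':
--             index_dic[j] = i
--             j = j + 1
--         i = i + 1
--     return index_dic
--
-- def get_movie_genres(line: str) -> List[str]:
--     r"""Retuen the list of movie genres
--
--     >>> get_movie_genres('68735,Warcraft,2016-05-25,123.0,Action,Adventure,Fantasy\n')
--     ['Action', 'Adventure', 'Fantasy']
--     >>> get_movie_genres('302156,Criminal,2016-04-14,113.0,Action\n')
--     ['Action']
--     >>> get_movie_genres('302156,Criminal,2016-04-14,113.0')
--     []
--     """
--     movie_gen = []
--     commas = comma_finder(line)
--     i = 4 ## genres start at forth comma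
--     last_comma = len(commas)
--     while i < last_comma:
--         movie_gen.append(line[commas[i] + 1: commas[i + 1]])
--         i = i + 1
--     if i == last_comma:
--         movie_gen.append(line[commas[i] + 1:].strip())
--     return movie_gen
-- ===== SOURCE B (Python) =====
-- def get_movie_genres(line):
--     genres = line.split(',')[4:]
--     if genres:
--         genres[-1] = genres[-1].strip()
--     return genres
-- ===== Notes on version B (the rewrite author's own statement) =====
-- stated objective: simpler
-- what changed: Replaced the index-dict of comma positions (comma_finder) and the positional slicing loop by a single line.split(',') with fields[4:] and stripping only the last field.
import Mathlib
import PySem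

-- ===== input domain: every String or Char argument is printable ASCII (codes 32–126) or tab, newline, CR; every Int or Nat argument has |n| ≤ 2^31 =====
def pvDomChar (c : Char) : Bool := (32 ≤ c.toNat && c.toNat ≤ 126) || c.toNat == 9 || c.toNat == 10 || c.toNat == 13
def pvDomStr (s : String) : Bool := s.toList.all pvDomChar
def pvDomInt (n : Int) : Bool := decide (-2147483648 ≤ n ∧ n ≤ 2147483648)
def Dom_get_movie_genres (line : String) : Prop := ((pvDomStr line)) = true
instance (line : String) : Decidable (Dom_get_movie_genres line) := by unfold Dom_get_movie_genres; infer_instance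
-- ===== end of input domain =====

-- B replaces A's comma-position dict and positional slicing loop by split(',') + fields[4:],
-- stripping only the last field (objective: simpler).

-- ===== PORT A =====
-- the while loop over indices i reading line[i] is rendered as a fold over the characters
-- paired with their indices (List.zipIdx), with state (index_dic, j)
def comma_finder (line : String) : PySem.Dict Int Int :=
  ((line.toList.zipIdx 0).foldl
    (fun (st : PySem.Dict Int Int × Int) ci =>
      if ci.1 = ',' then (st.1.insert st.2 (ci.2 : Int), st.2 + 1) else st)
    (PySem.Dict.mk [], 1)).1

-- the while loop of get_movie_genres plus the trailing `if i == last_comma` check;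
-- dict lookups are rendered with getD 0, which is only reached where the Python dict has
-- the key (4 ≤ i ≤ last_comma = number of commas), so Python's KeyError is unreachable
def genresLoop (line : String) (commas : PySem.Dict Int Int) (last : Int) (i : Int)
    (acc : List String) : List String :=
  if _h : i < last then
    genresLoop line commas last (i + 1)
      (acc ++ [PySem.Str.slice line (some ((commas.get? i).getD 0 + 1))
                 (some ((commas.get? (i + 1)).getD 0))])
  else if i = last then
    acc ++ [PySem.Str.strip (PySem.Str.slice line (some ((commas.get? i).getD 0 + 1)) none)]
  else acc
termination_by (last - i).toNat
decreasing_by omega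

def get_movie_genres (line : String) : List String :=
  let commas := comma_finder line
  genresLoop line commas (commas.size : Int) 4 []

-- ===== PORT B =====
-- "," is never empty, so split? is always `some`; getD [] is unreachable
def get_movie_genres_alt (line : String) : List String :=
  let fields := (PySem.Str.split? line ",").getD []
  let genres := PySem.List.slice fields (some 4) none
  match genres.getLast? with
  | none => genres
  | some x => genres.dropLast ++ [PySem.Str.strip x]

-- ===== PRECONDITION & SPEC =====
def Spec_get_movie_genres (line : String) (out : List String) : Prop := out = get_movie_genres_alt line
instance (line : String) (out : List String) : Decidable (Spec_get_movie_genres line out) := by unfold Spec_get_movie_genres; infer_instance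

-- ===== CLAIM (what is proved, stated in full; the proofs are below) =====
def Claim_equal_get_movie_genres : Prop := ∀ (line : String), Dom_get_movie_genres line → Spec_get_movie_genres line (get_movie_genres line)

-- ===== LEMMAS AND PROOFS =====

-- positions of the commas in a character list
def posList : List Char → List Nat
  | [] => []
  | c :: r => if c = ',' then 0 :: (posList r).map (· + 1) else (posList r).map (· + 1)

-- split on ',' as a structural recursion
def splitC : List Char → List (List Char)
  | [] => [[]]
  | c :: r =>
    if c = ',' then [] :: splitC r
    else
      match splitC r with
      | [] => [[c]]
      | p :: ps => (c :: p) :: ps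

-- strip the last element of a list of char lists
def lastStrip : List (List Char) → List (List Char)
  | [] => []
  | [x] => [PySem.Chars.strip x]
  | x :: y :: xs => x :: lastStrip (y :: xs)

lemma posList_ne_nil_head {t : List Char} {q : Nat} {rest : List Nat}
    (h : posList t = q :: rest) : t ≠ [] := by
  intro hnil; subst hnil; simp [posList] at h

-- the fields A's loop produces from a suffix that starts right after a comma
def chunks (t : List Char) : List (List Char) :=
  match h : posList t with
  | [] => [PySem.Chars.strip t]
  | q :: _ => t.take q :: chunks (t.drop (q + 1))
termination_by t.length
decreasing_by
  have := posList_ne_nil_head h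
  have : 0 < t.length := by cases t with | nil => simp at this | cons a b => simp
  simp; omega

lemma splitC_ne_nil (cs : List Char) : splitC cs ≠ [] := by
  induction cs with
  | nil => simp [splitC]
  | cons c r ih =>
    simp only [splitC]
    split
    · simp
    · cases h : splitC r <;> simp

lemma length_splitC (cs : List Char) : (splitC cs).length = (posList cs).length + 1 := by
  induction cs with
  | nil => simp [splitC, posList]
  | cons c r ih =>
    simp only [splitC, posList]
    split
    · simpa using ih
    · cases h : splitC r with
      | nil => exact absurd h (splitC_ne_nil r)
      | cons p ps => simp_all

lemma splitC_of_posList_nil {cs : List Char} (h : posList cs = []) : splitC cs = [cs] := by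
  induction cs with
  | nil => simp [splitC]
  | cons c r ih =>
    simp only [posList] at h
    split at h
    · simp at h
    · have hr : posList r = [] := by simpa using h
      simp only [splitC]
      rw [if_neg (by assumption), ih hr]

lemma go_eq (cs : List Char) : ∀ (fuel : Nat) (cur : List Char) (accs : List (List Char))
    (h t' : _) , cs.length ≤ fuel → splitC cs = h :: t' →
    PySem.Chars.splitOn.go [','] fuel cs cur accs =
      accs.reverse ++ (cur.reverse ++ h) :: t' := by
  induction cs with
  | nil =>
    intro fuel cur accs h t' _ hsp
    simp only [splitC] at hsp
    injection hsp with h1 h2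
    subst h1; subst h2
    cases fuel <;> simp [PySem.Chars.splitOn.go]
  | cons c r ih =>
    intro fuel cur accs h t' hlen hsp
    cases fuel with
    | zero => simp at hlen
    | succ fuel =>
      simp only [splitC] at hsp
      by_cases hc : c = ','
      · subst hc
        rw [if_pos rfl] at hsp
        cases hsr : splitC r with
        | nil => exact absurd hsr (splitC_ne_nil r)
        | cons h2 t2 =>
          rw [hsr] at hsp
          injection hsp with h1 h2eq
          subst h1; subst h2eq
          rw [show PySem.Chars.splitOn.go [','] (fuel+1) (',' :: r) cur accs =
              PySem.Chars.splitOn.go [','] fuel r [] (cur.reverse :: accs) from by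
            simp [PySem.Chars.splitOn.go]]
          rw [ih fuel [] (cur.reverse :: accs) h2 t2 (by simpa using hlen) hsr]
          simp
      · rw [if_neg hc] at hsp
        cases hsr : splitC r with
        | nil => exact absurd hsr (splitC_ne_nil r)
        | cons p ps =>
          rw [hsr] at hsp
          injection hsp with h1 h2eq
          subst h1; subst h2eq
          rw [show PySem.Chars.splitOn.go [','] (fuel+1) (c :: r) cur accs =
              PySem.Chars.splitOn.go [','] fuel r (c :: cur) accs from by
            simp only [PySem.Chars.splitOn.go]
            rw [if_neg (by simp; intro he; exact absurd he.symm hc)]]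
          rw [ih fuel (c :: cur) accs p ps (by simpa using hlen) hsr]
          simp

lemma splitOn_comma (cs : List Char) : PySem.Chars.splitOn cs [','] = splitC cs := by
  cases hsp : splitC cs with
  | nil => exact absurd hsp (splitC_ne_nil cs)
  | cons h t =>
    unfold PySem.Chars.splitOn
    rw [go_eq cs (cs.length + 1) [] [] h t (by omega) hsp]
    simp

-- the association list comma_finder builds
def entries : List Nat → Int → Nat → List (Int × Int)
  | [], _, _ => []
  | p :: rest, j, off => (j, ((off + p : Nat) : Int)) :: entries rest (j + 1) off

lemma entries_map_succ (ps : List Nat) (j : Int) (off : Nat) :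
    entries (ps.map (· + 1)) j off = entries ps j (off + 1) := by
  induction ps generalizing j with
  | nil => simp [entries]
  | cons p rest ih =>
    simp only [List.map, entries, ih]
    have hpp : off + (p + 1) = off + 1 + p := by omega
    rw [hpp]

lemma length_entries (ps : List Nat) (j : Int) (off : Nat) :
    (entries ps j off).length = ps.length := by
  induction ps generalizing j with
  | nil => simp [entries]
  | cons p rest ih => simp [entries, ih]

lemma foldl_comma_finder (cs : List Char) : ∀ (d : PySem.Dict Int Int) (j : Int) (off : Nat),
    (∀ kv ∈ d.items, kv.1 < j) →
    ((cs.zipIdx off).foldl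
      (fun (st : PySem.Dict Int Int × Int) ci =>
        if ci.1 = ',' then (st.1.insert st.2 (ci.2 : Int), st.2 + 1) else st)
      (d, j)) =
    (PySem.Dict.mk (d.items ++ entries (posList cs) j off), j + ((posList cs).length : Int)) := by
  induction cs with
  | nil =>
    intro d j off _
    simp [posList, entries]
  | cons c r ih =>
    intro d j off hk
    rw [List.zipIdx_cons, List.foldl_cons]
    by_cases hc : c = ','
    · subst hc
      simp only [reduceIte]
      have hfresh : d.contains j = false := by
        simp only [PySem.Dict.contains, List.any_eq_false]
        intro kv hkv
        have := hk kv hkv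
        simp only [beq_iff_eq]
        omega
      have hins : d.insert j (off : Int) = PySem.Dict.mk (d.items ++ [(j, (off : Int))]) :=
        by rw [PySem.Dict.insert, hfresh]; simp
      rw [hins]
      rw [ih (PySem.Dict.mk (d.items ++ [(j, (off : Int))])) (j + 1) (off + 1)
        (by intro kv hkv
            simp only [List.mem_append, List.mem_singleton] at hkv
            rcases hkv with h1 | h1
            · have := hk kv h1; omega
            · subst h1; simp)]
      simp only [posList, reduceIte, entries, entries_map_succ, List.length_cons]
      refine Prod.ext ?_ ?_
      · simp
      · simp; push_cast; ring
    · rw [if_neg (by simpa using hc)]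
      rw [ih d j (off + 1) hk]
      simp only [posList, if_neg hc, entries_map_succ]
      simp

lemma comma_finder_items (line : String) :
    comma_finder line = PySem.Dict.mk (entries (posList line.toList) 1 0) := by
  unfold comma_finder
  rw [foldl_comma_finder line.toList (PySem.Dict.mk []) 1 0 (by simp)]
  simp

lemma get_entries (ps : List Nat) : ∀ (j : Int) (off i : Nat) (p : Nat), ps[i]? = some p →
    PySem.Dict.get? (PySem.Dict.mk (entries ps j off)) (j + (i : Int)) = some ((off + p : Nat) : Int) := by
  induction ps with
  | nil => intro j off i p h; simp at h
  | cons q rest ih =>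
    intro j off i p h
    cases i with
    | zero =>
      simp at h; subst h
      simp [entries, PySem.Dict.get?, List.find?]
    | succ i =>
      have hne : (j + ((i : Int) + 1)) ≠ j := by omega
      simp only [entries]
      rw [show (j + ((Nat.succ i : Nat) : Int)) = (j + 1) + (i : Int) by push_cast; ring]
      have := ih (j + 1) off i p (by simpa using h)
      rw [PySem.Dict.get?] at this ⊢
      simp only [List.find?]
      rw [show ((j == (j + 1) + (i : Int))) = false by simp; omega]
      exact this

lemma posList_pairwise (cs : List Char) : (posList cs).Pairwise (· < ·) := by
  induction cs with
  | nil => simp [posList]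
  | cons c r ih =>
    simp only [posList]
    split
    · refine List.Pairwise.cons ?_ ?_
      · intro b hb
        simp only [List.mem_map] at hb
        obtain ⟨a, _, rfl⟩ := hb; omega
      · exact (List.pairwise_map).mpr (ih.imp (by omega))
    · exact (List.pairwise_map).mpr (ih.imp (by omega))

lemma map_sub_succ_comp (p : Nat) (l : List Nat) :
    (l.map (· + 1)).map (· - (p + 1)) = l.map (· - p) := by
  rw [List.map_map]
  apply List.map_congr_left
  intro x _
  simp only [Function.comp]
  omega

lemma posList_suffix (cs : List Char) : ∀ (i p : Nat), (posList cs)[i]? = some p →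
    posList (cs.drop (p + 1)) = ((posList cs).drop (i + 1)).map (· - (p + 1)) := by
  induction cs with
  | nil => intro i p h; simp [posList] at h
  | cons c r ih =>
    intro i p h
    by_cases hc : c = ','
    · subst hc
      simp only [posList, reduceIte] at h ⊢
      cases i with
      | zero =>
        simp only [List.getElem?_cons_zero, Option.some.injEq] at h
        subst h
        show posList r = ((posList r).map (· + 1)).map (· - (0 + 1))
        rw [map_sub_succ_comp]
        simp
      | succ i =>
        simp only [List.getElem?_cons_succ, List.getElem?_map] at h
        cases hq : (posList r)[i]? with
        | none => simp [hq] at h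
        | some q =>
          rw [hq] at h
          simp only [Option.map_some, Option.some.injEq] at h
          subst h
          have hIH := ih i q hq
          show posList (List.drop (q + 1) r) =
            (((posList r).map (· + 1)).drop (i + 1)).map (· - (q + 1 + 1))
          rw [← List.map_drop, map_sub_succ_comp, hIH]
    · simp only [posList, if_neg hc] at h ⊢
      simp only [List.getElem?_map] at h
      cases hq : (posList r)[i]? with
      | none => simp [hq] at h
      | some q =>
        rw [hq] at h
        simp only [Option.map_some, Option.some.injEq] at h
        subst h
        have hIH := ih i q hq
        show posList (List.drop (q + 1) r) =
          (((posList r).map (· + 1)).drop (i + 1)).map (· - (q + 1 + 1))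
        rw [← List.map_drop, map_sub_succ_comp, hIH]

lemma chunks_of_nil (t : List Char) (h : posList t = []) :
    chunks t = [PySem.Chars.strip t] := by
  rw [chunks]
  split
  · rfl
  · rename_i q rest h'; rw [h'] at h; cases h

lemma chunks_of_cons (t : List Char) (q : Nat) (rest : List Nat)
    (h : posList t = q :: rest) : chunks t = t.take q :: chunks (t.drop (q + 1)) := by
  rw [chunks]
  split
  · rename_i h'; rw [h'] at h; cases h
  · rename_i q' rest' h'
    rw [h'] at h
    injection h with h1 _
    subst h1; rfl

lemma chunks_eq_lastStrip (t : List Char) : chunks t = lastStrip (splitC t) := by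
  induction t with
  | nil =>
    rw [chunks_of_nil [] rfl]
    simp [splitC, lastStrip]
  | cons c r ih =>
    by_cases hc : c = ','
    · subst hc
      have h1 : posList (',' :: r) = 0 :: (posList r).map (· + 1) := by simp [posList]
      rw [chunks_of_cons _ _ _ h1]
      cases hsr : splitC r with
      | nil => exact absurd hsr (splitC_ne_nil r)
      | cons p ps =>
        show [] :: chunks r = lastStrip (splitC (',' :: r))
        rw [show splitC (',' :: r) = [] :: splitC r from by simp [splitC], hsr,
          show lastStrip ([] :: p :: ps) = [] :: lastStrip (p :: ps) from rfl, ← hsr, ← ih]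
    · cases hq : posList r with
      | nil =>
        have h1 : posList (c :: r) = [] := by simp [posList, hc, hq]
        rw [chunks_of_nil _ h1, splitC_of_posList_nil h1]
        simp [lastStrip]
      | cons q rest =>
        have h1 : posList (c :: r) = (q + 1) :: rest.map (· + 1) := by
          simp [posList, hc, hq]
        rw [chunks_of_cons _ _ _ h1]
        cases hsr : splitC r with
        | nil => exact absurd hsr (splitC_ne_nil r)
        | cons h t =>
          have hlen : (splitC r).length = rest.length + 2 := by
            rw [length_splitC, hq]; simp
          cases t with
          | nil => rw [hsr] at hlen; simp at hlen
          | cons h2 t2 =>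
            have hch : chunks r = r.take q :: chunks (r.drop (q + 1)) :=
              chunks_of_cons _ _ _ hq
            have hkey : r.take q = h ∧ chunks (r.drop (q + 1)) = lastStrip (h2 :: t2) := by
              have := hch.symm.trans (ih.trans (by rw [hsr]))
              rw [show lastStrip (h :: h2 :: t2) = h :: lastStrip (h2 :: t2) from rfl] at this
              injection this with a b
              exact ⟨a, b⟩
            show (c :: r).take (q + 1) :: chunks ((c :: r).drop (q + 1 + 1)) =
              lastStrip (splitC (c :: r))
            rw [show splitC (c :: r) = (c :: h) :: h2 :: t2 from by
                simp only [splitC, if_neg hc, hsr],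
              show lastStrip ((c :: h) :: h2 :: t2) = (c :: h) :: lastStrip (h2 :: t2) from rfl,
              List.take_succ_cons, hkey.1,
              show (c :: r).drop (q + 1 + 1) = r.drop (q + 1) from rfl, hkey.2]

lemma drop_splitC (cs : List Char) : ∀ (k : Nat),
    (splitC cs).drop (k + 1) =
      match (posList cs)[k]? with
      | some p => splitC (cs.drop (p + 1))
      | none => [] := by
  induction cs with
  | nil => intro k; simp [splitC, posList]
  | cons c r ih =>
    intro k
    by_cases hc : c = ','
    · subst hc
      rw [show splitC (',' :: r) = [] :: splitC r from by simp [splitC],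
        show posList (',' :: r) = 0 :: (posList r).map (· + 1) from by simp [posList]]
      cases k with
      | zero => simp
      | succ k =>
        rw [List.drop_succ_cons, List.getElem?_cons_succ, List.getElem?_map]
        cases hq : (posList r)[k]? with
        | none => simp [hq, ih k]
        | some q =>
          have := ih k
          rw [hq] at this
          simp only [hq, Option.map_some]
          exact this
    · cases hsr : splitC r with
      | nil => exact absurd hsr (splitC_ne_nil r)
      | cons p ps =>
        rw [show splitC (c :: r) = (c :: p) :: ps from by simp only [splitC, if_neg hc, hsr],
          show posList (c :: r) = (posList r).map (· + 1) from by simp [posList, hc],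
          List.drop_succ_cons, List.getElem?_map]
        have := ih k
        rw [hsr, List.drop_succ_cons] at this
        cases hq : (posList r)[k]? with
        | none => simp only [hq, Option.map_none]; rw [hq] at this; exact this
        | some q =>
          simp only [hq, Option.map_some]
          rw [hq] at this
          exact this

lemma lastStrip_eq (l : List (List Char)) (h : l ≠ []) :
    lastStrip l = l.dropLast ++ [PySem.Chars.strip (l.getLast h)] := by
  induction l with
  | nil => exact absurd rfl h
  | cons x xs ih =>
    cases xs with
    | nil => simp [lastStrip]
    | cons y ys =>
      rw [show lastStrip (x :: y :: ys) = x :: lastStrip (y :: ys) from rfl,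
        ih (by simp)]
      simp [List.getLast_cons]

lemma strip_ofList (u : List Char) :
    PySem.Str.strip (String.ofList u) = String.ofList (PySem.Chars.strip u) := by
  rw [PySem.Str.strip, String.toList_ofList]

lemma getElem?_lt_of_pairwise {ps : List Nat} (hpw : ps.Pairwise (· < ·)) {i j p q : Nat}
    (hij : i < j) (hp : ps[i]? = some p) (hq : ps[j]? = some q) : p < q := by
  rw [List.getElem?_eq_some_iff] at hp hq
  obtain ⟨hi, rfl⟩ := hp
  obtain ⟨hj, rfl⟩ := hq
  exact List.pairwise_iff_getElem.mp hpw i j hi hj hij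

lemma loop_eq (line : String) : ∀ (m i : Nat) (acc : List String) (p : Nat),
    1 ≤ i → i + m = (posList line.toList).length →
    (posList line.toList)[i - 1]? = some p →
    genresLoop line (PySem.Dict.mk (entries (posList line.toList) 1 0))
      (((posList line.toList).length : Nat) : Int) ((i : Nat) : Int) acc =
      acc ++ (chunks (line.toList.drop (p + 1))).map String.ofList := by
  intro m
  induction m with
  | zero =>
    intro i acc p h1 hm hp
    have hin : i = (posList line.toList).length := by omega
    rw [genresLoop, dif_neg (by omega), if_pos (by omega)]
    have hkey : ((i : Nat) : Int) = 1 + ((i - 1 : Nat) : Int) := by omega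
    rw [hkey, get_entries _ 1 0 (i - 1) p hp]
    have hslice : PySem.Str.slice line (some (((0 + p : Nat) : Int) + 1)) none =
        String.ofList (line.toList.drop (p + 1)) := by
      rw [PySem.Str.slice]
      congr 1
      rw [PySem.Chars.slice_eq_listSlice,
        show (((0 + p : Nat) : Int) + 1) = (((p + 1 : Nat) : Nat) : Int) by push_cast; ring,
        PySem.List.slice_from_natCast]
    rw [Option.getD_some, hslice, strip_ofList]
    have hpos : posList (line.toList.drop (p + 1)) = [] := by
      rw [posList_suffix line.toList (i - 1) p hp]
      have : i - 1 + 1 = (posList line.toList).length := by omega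
      rw [this, List.drop_length, List.map_nil]
    rw [chunks_of_nil _ hpos]
    simp
  | succ m ih =>
    intro i acc p h1 hm hp
    have hlt : i < (posList line.toList).length := by omega
    rw [genresLoop, dif_pos (by exact_mod_cast hlt)]
    cases hq : (posList line.toList)[i]? with
    | none =>
      rw [List.getElem?_eq_none_iff] at hq
      omega
    | some p' =>
      have hpp' : p < p' :=
        getElem?_lt_of_pairwise (posList_pairwise line.toList) (by omega) hp hq
      have hkey : ((i : Nat) : Int) = 1 + ((i - 1 : Nat) : Int) := by omega
      have hkey2 : ((i : Nat) : Int) + 1 = 1 + ((i : Nat) : Int) := by ring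
      rw [hkey2, get_entries _ 1 0 i p' hq, hkey, get_entries _ 1 0 (i - 1) p hp]
      have hslice : PySem.Str.slice line (some (((0 + p : Nat) : Int) + 1))
          (some ((0 + p' : Nat) : Int)) =
          String.ofList ((line.toList.drop (p + 1)).take (p' - (p + 1))) := by
        rw [PySem.Str.slice]
        congr 1
        rw [PySem.Chars.slice_eq_listSlice,
          show (((0 + p : Nat) : Int) + 1) = (((p + 1 : Nat) : Nat) : Int) by push_cast; ring,
          show ((0 + p' : Nat) : Int) = (((p' : Nat) : Nat) : Int) by push_cast; ring,
          PySem.List.slice_natCast]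
      rw [Option.getD_some, Option.getD_some, hslice]
      have := ih (i + 1) (acc ++ [String.ofList ((line.toList.drop (p + 1)).take (p' - (p + 1)))])
        p' (by omega) (by omega) (by simpa using hq)
      rw [show (((i + 1 : Nat) : Nat) : Int) = ((i : Nat) : Int) + 1 by push_cast; ring,
        hkey2, hkey] at this
      rw [this]
      have hposL : posList (line.toList.drop (p + 1)) =
          (p' - (p + 1)) :: (((posList line.toList).drop (i + 1)).map (· - (p + 1))) := by
        rw [posList_suffix line.toList (i - 1) p hp,
          show i - 1 + 1 = i by omega,
          List.drop_eq_getElem_cons hlt]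
        rw [List.getElem?_eq_some_iff] at hq
        rw [List.map_cons, hq.2]
      rw [chunks_of_cons _ _ _ hposL, List.drop_drop,
        show p + 1 + (p' - (p + 1) + 1) = p' + 1 by omega]
      simp

lemma A_char (line : String) :
    get_movie_genres line =
      match (posList line.toList)[3]? with
      | some p => (chunks (line.toList.drop (p + 1))).map String.ofList
      | none => [] := by
  rw [show get_movie_genres line =
      genresLoop line (comma_finder line) (((comma_finder line).size : Nat) : Int) 4 [] from rfl,
    comma_finder_items]
  have hsize : (PySem.Dict.mk (entries (posList line.toList) 1 0)).size =
      (posList line.toList).length := by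
    rw [PySem.Dict.size]; exact length_entries _ _ _
  rw [hsize]
  cases hq : (posList line.toList)[3]? with
  | none =>
    rw [List.getElem?_eq_none_iff] at hq
    rw [genresLoop, dif_neg (by omega), if_neg (by omega)]
  | some p =>
    have h3 : 3 < (posList line.toList).length := (List.getElem?_eq_some_iff.mp hq).1
    have := loop_eq line ((posList line.toList).length - 4) 4 [] p (by omega) (by omega)
      (by simpa using hq)
    rw [show (((4 : Nat) : Nat) : Int) = (4 : Int) from rfl] at this
    rw [this]
    simp

lemma B_char (line : String) :
    get_movie_genres_alt line =
      match (posList line.toList)[3]? with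
      | some p => (lastStrip (splitC (line.toList.drop (p + 1)))).map String.ofList
      | none => [] := by
  simp only [get_movie_genres_alt]
  rw [show PySem.Str.split? line "," =
      some ((splitC line.toList).map String.ofList) from by
    rw [PySem.Str.split?, PySem.Chars.split?,
      show (",".toList) = [','] from rfl]
    rw [if_neg (by simp), splitOn_comma]
    rfl]
  rw [Option.getD_some,
    PySem.List.slice_from ((splitC line.toList).map String.ofList) (by norm_num),
    show ((4 : Int)).toNat = 4 from rfl, ← List.map_drop]
  have hd := drop_splitC line.toList 3
  cases hq : (posList line.toList)[3]? with
  | none =>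
    rw [hq] at hd
    have hd2 : (splitC line.toList).drop 4 = [] := hd
    rw [hd2]
    rfl
  | some p =>
    rw [hq] at hd
    have hd2 : (splitC line.toList).drop 4 = splitC (line.toList.drop (p + 1)) := hd
    rw [hd2]
    have hne : splitC (line.toList.drop (p + 1)) ≠ [] := splitC_ne_nil _
    rw [show ((splitC (line.toList.drop (p + 1))).map String.ofList).getLast? =
        some (String.ofList ((splitC (line.toList.drop (p + 1))).getLast hne)) from by
      rw [List.getLast?_map, List.getLast?_eq_some_getLast hne, Option.map_some]]
    show ((splitC (line.toList.drop (p + 1))).map String.ofList).dropLast ++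
        [PySem.Str.strip (String.ofList ((splitC (line.toList.drop (p + 1))).getLast hne))] =
      (lastStrip (splitC (line.toList.drop (p + 1)))).map String.ofList
    rw [lastStrip_eq _ hne, List.map_append, List.map_dropLast]
    simp [strip_ofList]

-- ===== VERDICT (by name: the statement is the Claim_ definition above) =====
theorem get_movie_genres_spec : Claim_equal_get_movie_genres := by
  intro line _
  unfold Spec_get_movie_genres
  rw [A_char, B_char]
  cases h : (posList line.toList)[3]? with
  | none => simp
  | some p => simp [chunks_eq_lastStrip]
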